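-- pv_equiv track=rewrite | github.com/TejasaVi/miscellaneous | python/strings/string_with_comma.py | string_with_commas
-- ===== SOURCE A (Python) =====
-- import string
--
-- def reverse(s):
--     str = ""
--     for i in s:
--         str = i + str
--     return str
--
-- def string_with_commas(inputStr):
--     newStr = ""
--     sign = ""
--     # input sanitization: remove spaces, if string has spaces drop spaces
--     # if number has special characters return NULL string.
--     # if number starts with (-) print output with sign, incase number starts with (+) drop (+)
--     inputStr = inputStr.strip()
--     inputStr = "".join(inputStr.split(" "))
--     invalidcharacters= set(string.punctuation)
--     invalidcharacters.remove('-')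
--     invalidcharacters.remove('+')
--     if any(char in invalidcharacters for char in inputStr):
--         return ""
--     if inputStr.startswith('-') or inputStr.startswith('+'):
--         if inputStr[0] == '-':
--             sign = '-'
--         inputStr = inputStr[1:]
--
--     # input sanity checked
--     strLen = len(inputStr)
--
--     if strLen <4:
--         return sign + inputStr
--     reversedInput = reverse(inputStr)
--     first_comma = 0
--     while strLen > 2:
--         if not first_comma:
--             newStr = reversedInput[0:3] + ','
--             strLen = strLen -3
--             first_comma = 1
--             reversedInput = reversedInput[3:]
--         else:
--             newStr = newStr + reversedInput[0:2] + ','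
--             strLen = strLen - 2
--             reversedInput = reversedInput[2:]
--     return sign + reverse(newStr + reversedInput)
-- ===== SOURCE B (Python) =====
-- import string
--
-- def string_with_commas(inputStr):
--     sign = ""
--     inputStr = inputStr.strip()
--     inputStr = "".join(inputStr.split(" "))
--     invalidcharacters = set(string.punctuation)
--     invalidcharacters.remove('-')
--     invalidcharacters.remove('+')
--     if any(char in invalidcharacters for char in inputStr):
--         return ""
--     if inputStr.startswith('-') or inputStr.startswith('+'):
--         if inputStr[0] == '-':
--             sign = '-'
--         inputStr = inputStr[1:]
--     if len(inputStr) < 4: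
--         return sign + inputStr
--     head, tail = inputStr[:-3], inputStr[-3:]
--     off = len(head) % 2
--     pieces = [head[:off]] if off else []
--     pieces += [head[i:i + 2] for i in range(off, len(head), 2)]
--     pieces.append(tail)
--     return sign + ",".join(pieces)
-- ===== Notes on version B (the rewrite author's own statement) =====
-- stated objective: faster
-- what changed: The grouping no longer reverses the string twice with a char-by-char prepend helper and a stateful while-loop re-slicing it; B splits off the last three characters and chunks the head into pairs by direct right-aligned slicing (offset = len(head) % 2), then joins once with commas.
import Mathlib
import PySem

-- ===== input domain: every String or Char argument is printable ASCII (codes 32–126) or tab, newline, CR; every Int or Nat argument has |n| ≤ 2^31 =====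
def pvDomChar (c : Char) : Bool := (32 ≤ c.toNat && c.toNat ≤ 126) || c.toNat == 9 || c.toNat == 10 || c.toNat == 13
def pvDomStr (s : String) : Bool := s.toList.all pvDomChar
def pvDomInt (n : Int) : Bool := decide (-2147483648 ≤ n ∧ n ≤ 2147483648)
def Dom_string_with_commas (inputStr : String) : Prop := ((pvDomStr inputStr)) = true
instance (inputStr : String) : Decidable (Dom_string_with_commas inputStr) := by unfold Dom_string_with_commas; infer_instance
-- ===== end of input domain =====

-- B replaces A's char-by-char string reversal + mutating while-loop by direct right-aligned
-- slicing (tail = last 3, head chunked in twos via an offset), same sanitization; objective: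
-- faster (a timing run measured B faster at the largest sizes).

-- ===== PORT A =====
-- string.punctuation
def pvPunctuation : List Char := "!\"#$%&'()*+,-./:;<=>?@[\\]^_`{|}~".toList

-- set(string.punctuation) with '-' and '+' removed; set.remove raises KeyError only when the
-- element is absent, and both are present here, so the .getD defaults are never used.
def pvInvalid : PySem.Set Char :=
  ((((PySem.Set.ofList pvPunctuation).remove? '-').getD (PySem.Set.ofList [])).remove? '+').getD
    (PySem.Set.ofList [])

-- helper 'reverse' of Source A: for i in s: str = i + str
def pvReverseA (s : List Char) : List Char := s.foldl (fun acc c => [c] ++ acc) []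

-- the while-loop of A: state (newStr, strLen, first_comma, reversedInput)
def pvLoopA (newStr : List Char) (strLen : Int) (firstComma : Bool) (rev : List Char) :
    List Char × List Char :=
  if 2 < strLen then
    if firstComma = false then
      pvLoopA (PySem.List.slice rev none (some 3) ++ [',']) (strLen - 3) true
        (PySem.List.slice rev (some 3) none)
    else
      pvLoopA (newStr ++ PySem.List.slice rev none (some 2) ++ [',']) (strLen - 2) firstComma
        (PySem.List.slice rev (some 2) none)
  else (newStr, rev)
termination_by strLen.toNat
decreasing_by all_goals omega

def string_with_commas (inputStr : String) : String :=
  let s1 := PySem.Chars.strip inputStr.toList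
  let s2 := PySem.Chars.join [] (PySem.Chars.splitOn s1 [' '])
  if s2.any (fun c => pvInvalid.contains c) then "" else
  let p :=
    if PySem.Chars.startswith s2 ['-'] || PySem.Chars.startswith s2 ['+'] then
      ((if PySem.Chars.pyGet? s2 0 = some '-' then ['-'] else []), PySem.List.slice s2 (some 1) none)
    else ([], s2)
  let sign := p.1
  let s3 := p.2
  let strLen : Int := (PySem.Chars.len s3 : Int)
  if strLen < 4 then String.mk (sign ++ s3) else
  let reversedInput := pvReverseA s3
  let r := pvLoopA [] strLen false reversedInput
  String.mk (sign ++ pvReverseA (r.1 ++ r.2))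

-- ===== PORT B =====
def string_with_commas_alt (inputStr : String) : String :=
  let s1 := PySem.Chars.strip inputStr.toList
  let s2 := PySem.Chars.join [] (PySem.Chars.splitOn s1 [' '])
  if s2.any (fun c => pvInvalid.contains c) then "" else
  let p :=
    if PySem.Chars.startswith s2 ['-'] || PySem.Chars.startswith s2 ['+'] then
      ((if PySem.Chars.pyGet? s2 0 = some '-' then ['-'] else []), PySem.List.slice s2 (some 1) none)
    else ([], s2)
  let sign := p.1
  let s3 := p.2
  if ((PySem.Chars.len s3 : Int)) < 4 then String.mk (sign ++ s3) else
  let head := PySem.List.slice s3 none (some (-3))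
  let tail := PySem.List.slice s3 (some (-3)) none
  let off : Int := PySem.Int.mod (PySem.Chars.len head : Int) 2
  let pieces :=
    (if off ≠ 0 then [PySem.List.slice head none (some off)] else []) ++
      (PySem.List.pyRange off (PySem.Chars.len head : Int) 2).map
        (fun i => PySem.List.slice head (some i) (some (i + 2))) ++ [tail]
  String.mk (sign ++ PySem.Chars.join [','] pieces)

-- ===== PRECONDITION & SPEC =====
def Spec_string_with_commas (inputStr : String) (out : String) : Prop := out = string_with_commas_alt inputStr
instance (inputStr : String) (out : String) : Decidable (Spec_string_with_commas inputStr out) := by unfold Spec_string_with_commas; infer_instance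

-- ===== CLAIM (what is proved, stated in full; the proofs are below) =====
def Claim_equal_string_with_commas : Prop := ∀ (inputStr : String), Dom_string_with_commas inputStr → Spec_string_with_commas inputStr (string_with_commas inputStr)

-- ===== LEMMAS AND PROOFS =====

def pvChunks (m : Int) (rev : List Char) : List Char :=
  if 2 < m then rev.take 2 ++ [','] ++ pvChunks (m - 2) (rev.drop 2) else rev
termination_by m.toNat
decreasing_by omega

def pvGroup (h : List Char) : List (List Char) :=
  if h.length ≤ 2 then [h] else pvGroup (h.take (h.length - 2)) ++ [h.drop (h.length - 2)]
termination_by h.length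
decreasing_by simp; omega

lemma pvGroup_ne_nil (h : List Char) : pvGroup h ≠ [] := by
  rw [pvGroup]; split <;> simp

lemma pvJoin_append_singleton (xs : List (List Char)) (y : List Char) (hx : xs ≠ []) :
    PySem.Chars.join [','] (xs ++ [y]) = PySem.Chars.join [','] xs ++ [','] ++ y := by
  induction xs with
  | nil => simp at hx
  | cons a rest ih =>
    cases rest with
    | nil => simp [PySem.Chars.join_cons_cons, PySem.Chars.join_singleton]
    | cons b rs =>
      simp only [List.cons_append]
      rw [PySem.Chars.join_cons_cons, PySem.Chars.join_cons_cons]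
      rw [← List.cons_append, ih (by simp)]
      simp

lemma pvChunks_eq_group (h : List Char) (hh : 1 ≤ h.length) :
    (pvChunks (h.length : Int) h.reverse).reverse = PySem.Chars.join [','] (pvGroup h) := by
  induction h using pvGroup.induct with
  | case1 h hle =>
    rw [pvChunks, if_neg (by exact_mod_cast not_lt.mpr (by omega : h.length ≤ 2)), pvGroup,
      if_pos hle, PySem.Chars.join_singleton, List.reverse_reverse]
  | case2 h hgt ih =>
    have h2 : 2 < h.length := by omega
    have htk : (h.take (h.length - 2)).length = h.length - 2 := by simp
    rw [pvChunks, if_pos (by exact_mod_cast h2), List.take_reverse, List.drop_reverse,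
      (by omega : ((h.length : Int) - 2) = ((h.length - 2 : Nat) : Int))]
    have ih' := ih (by rw [htk]; omega)
    rw [htk] at ih'
    simp only [List.reverse_append, List.reverse_reverse, List.reverse_cons, List.reverse_nil,
      List.nil_append, List.append_assoc]
    rw [ih']
    conv_rhs => rw [pvGroup]
    rw [if_neg hgt, pvJoin_append_singleton _ _ (pvGroup_ne_nil _)]
    simp

lemma pvPieces_norm (h : List Char) (hh : 1 ≤ h.length) :
    (if h.length % 2 ≠ 0 then [h.take (h.length % 2)] else []) ++
      (List.range ((h.length - h.length % 2) / 2)).map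
        (fun k => (h.drop (h.length % 2 + 2 * k)).take 2) = pvGroup h := by
  induction h using pvGroup.induct with
  | case1 h hle =>
    rw [pvGroup, if_pos hle]
    rcases (by omega : h.length = 1 ∨ h.length = 2) with hl | hl
    · rw [hl]
      simp [List.take_of_length_le (by omega : h.length ≤ 1)]
    · rw [hl]
      simp [List.range_succ, List.take_of_length_le (by omega : h.length ≤ 2)]
  | case2 h hgt ih =>
    have h2 : 2 < h.length := by omega
    have htk : (h.take (h.length - 2)).length = h.length - 2 := by simp
    have hmod : (h.length - 2) % 2 = h.length % 2 := by omega
    have hN : (h.length - h.length % 2) / 2 = ((h.length - 2) - h.length % 2) / 2 + 1 := by omega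
    have ih' := ih (by rw [htk]; omega)
    rw [htk, hmod] at ih'
    rw [pvGroup, if_neg hgt, ← ih', hN, List.range_succ, List.map_append]
    have hlast : h.length % 2 + 2 * ((h.length - 2 - h.length % 2) / 2) = h.length - 2 := by omega
    simp only [List.map_cons, List.map_nil, hlast]
    rw [List.take_of_length_le (l := h.drop (h.length - 2)) (by simp; omega)]
    have hopt : (if h.length % 2 ≠ 0 then [(h.take (h.length - 2)).take (h.length % 2)] else [])
        = (if h.length % 2 ≠ 0 then [h.take (h.length % 2)] else []) := by
      rw [List.take_take, min_eq_left (by omega)]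
    have hmap : (List.range ((h.length - 2 - h.length % 2) / 2)).map
          (fun k => ((h.take (h.length - 2)).drop (h.length % 2 + 2 * k)).take 2)
        = (List.range ((h.length - 2 - h.length % 2) / 2)).map
          (fun k => (h.drop (h.length % 2 + 2 * k)).take 2) := by
      apply List.map_congr_left
      intro k hk
      rw [List.mem_range] at hk
      rw [List.drop_take, List.take_take, min_eq_left (by omega)]
    rw [hopt, hmap, List.append_assoc]


lemma pvPieces_eq_group (h : List Char) (hh : 1 ≤ h.length) :
    (if PySem.Int.mod (h.length : Int) 2 ≠ 0 then
        [PySem.List.slice h none (some (PySem.Int.mod (h.length : Int) 2))] else []) ++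
      (PySem.List.pyRange (PySem.Int.mod (h.length : Int) 2) (h.length : Int) 2).map
        (fun i => PySem.List.slice h (some i) (some (i + 2))) = pvGroup h := by
  have hmod : PySem.Int.mod (h.length : Int) 2 = ((h.length % 2 : Nat) : Int) := by
    exact_mod_cast PySem.Int.mod_natCast h.length 2
  rw [hmod, PySem.List.pyRange_of_pos _ _ (by norm_num)]
  have hcount : (if ((h.length % 2 : Nat) : Int) < (h.length : Int) then
      (((h.length : Int) - ((h.length % 2 : Nat) : Int) + 2 - 1) / 2).toNat else 0)
      = (h.length - h.length % 2) / 2 := by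
    split_ifs with hlt
    · omega
    · omega
  rw [hcount, List.map_map]
  have hbody : ((fun i => PySem.List.slice h (some i) (some (i + 2))) ∘
      fun k : Nat => ((h.length % 2 : Nat) : Int) + 2 * (k : Int))
      = fun k : Nat => (h.drop (h.length % 2 + 2 * k)).take 2 := by
    funext k
    simp only [Function.comp_apply]
    rw [(by push_cast; ring : ((h.length % 2 : Nat) : Int) + 2 * (k : Int)
          = ((h.length % 2 + 2 * k : Nat) : Int)),
        (by push_cast; ring : ((h.length % 2 + 2 * k : Nat) : Int) + 2
          = ((h.length % 2 + 2 * k + 2 : Nat) : Int)),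
        PySem.List.slice_natCast]
    congr 1
    omega
  rw [hbody]
  have hopt : PySem.List.slice h none (some ((h.length % 2 : Nat) : Int)) = h.take (h.length % 2) := by
    rw [PySem.List.slice_to _ (by positivity)]
    simp
    omega
  rw [hopt]
  simp only [ne_eq, Nat.cast_eq_zero]
  exact pvPieces_norm h hh

lemma pvReverseA_eq (s : List Char) : pvReverseA s = s.reverse := by
  have aux : ∀ (t acc : List Char), t.foldl (fun a c => [c] ++ a) acc = t.reverse ++ acc := by
    intro t
    induction t with
    | nil => simp
    | cons x xs ih => intro acc; simp [List.foldl]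
  rw [pvReverseA, aux, List.append_nil]

lemma pvLoopA_true (m : Int) (rev acc : List Char) :
    (pvLoopA acc m true rev).1 ++ (pvLoopA acc m true rev).2 = acc ++ pvChunks m rev := by
  induction m, rev using pvChunks.induct generalizing acc with
  | case1 m rev hm ih =>
    rw [pvLoopA, if_pos hm, if_neg (by simp), PySem.List.slice_to _ (by norm_num),
      PySem.List.slice_from _ (by norm_num), (by decide : (2:Int).toNat = 2), ih]
    conv_rhs => rw [pvChunks, if_pos hm]
    simp
  | case2 m rev hm =>
    rw [pvLoopA, if_neg hm, pvChunks, if_neg hm]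

lemma pvSliceNeg3_take (l : List Char) (h4 : 4 ≤ l.length) :
    PySem.List.slice l none (some (-3)) = l.take (l.length - 3) := by
  simp only [PySem.List.slice, PySem.List.clampIdx]
  norm_num
  rw [if_neg (by omega : ¬ l.length < 3)]
  omega

lemma pvSliceNeg3_drop (l : List Char) (h4 : 4 ≤ l.length) :
    PySem.List.slice l (some (-3)) none = l.drop (l.length - 3) := by
  simp only [PySem.List.slice, PySem.List.clampIdx]
  norm_num
  rw [if_neg (by omega)]
  rw [(by omega : ((l.length : Int) + -3).toNat = l.length - 3)]
  rw [List.take_of_length_le (by simp)]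

lemma pvCore (l : List Char) (h4 : 4 ≤ l.length) :
    pvReverseA ((pvLoopA [] (l.length : Int) false (pvReverseA l)).1 ++
        (pvLoopA [] (l.length : Int) false (pvReverseA l)).2) =
      PySem.Chars.join [',']
        ((if PySem.Int.mod ((PySem.List.slice l none (some (-3))).length : Int) 2 ≠ 0 then
            [PySem.List.slice (PySem.List.slice l none (some (-3))) none
              (some (PySem.Int.mod ((PySem.List.slice l none (some (-3))).length : Int) 2))] else []) ++
          (PySem.List.pyRange (PySem.Int.mod ((PySem.List.slice l none (some (-3))).length : Int) 2)
              ((PySem.List.slice l none (some (-3))).length : Int) 2).map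
            (fun i => PySem.List.slice (PySem.List.slice l none (some (-3))) (some i) (some (i + 2))) ++
          [PySem.List.slice l (some (-3)) none]) := by
  have hstep : pvLoopA [] (l.length : Int) false (pvReverseA l)
      = pvLoopA (l.reverse.take 3 ++ [',']) ((l.length : Int) - 3) true (l.reverse.drop 3) := by
    rw [pvReverseA_eq, pvLoopA, if_pos (by exact_mod_cast (by omega : 2 < l.length)),
      if_pos rfl, PySem.List.slice_to _ (by norm_num), PySem.List.slice_from _ (by norm_num),
      (by decide : (3 : Int).toNat = 3)]
  rw [hstep, pvLoopA_true, pvReverseA_eq, List.take_reverse, List.drop_reverse,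
    (by omega : (l.length : Int) - 3 = ((l.length - 3 : Nat) : Int))]
  have htk : (l.take (l.length - 3)).length = l.length - 3 := by simp
  have hchunks := pvChunks_eq_group (l.take (l.length - 3)) (by rw [htk]; omega)
  rw [htk] at hchunks
  simp only [List.reverse_append, List.reverse_reverse, List.reverse_cons, List.reverse_nil,
    List.nil_append, List.append_assoc]
  rw [hchunks]
  rw [pvSliceNeg3_take l h4, pvSliceNeg3_drop l h4]
  have hpieces := pvPieces_eq_group (l.take (l.length - 3)) (by rw [htk]; omega)
  rw [htk] at hpieces
  rw [htk]
  conv_rhs => rw [← List.append_assoc]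
  rw [pvJoin_append_singleton _ _ (by
      rw [hpieces]; exact pvGroup_ne_nil _), hpieces]
  simp [List.append_assoc]


lemma pvElse (sign l : List Char) (h4 : 4 ≤ l.length) :
    String.mk (sign ++ pvReverseA ((pvLoopA [] (l.length : Int) false (pvReverseA l)).1 ++
        (pvLoopA [] (l.length : Int) false (pvReverseA l)).2))
      = String.mk (sign ++ PySem.Chars.join [',']
        ((if PySem.Int.mod ((PySem.List.slice l none (some (-3))).length : Int) 2 ≠ 0 then
            [PySem.List.slice (PySem.List.slice l none (some (-3))) none
              (some (PySem.Int.mod ((PySem.List.slice l none (some (-3))).length : Int) 2))] else []) ++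
          (PySem.List.pyRange (PySem.Int.mod ((PySem.List.slice l none (some (-3))).length : Int) 2)
              ((PySem.List.slice l none (some (-3))).length : Int) 2).map
            (fun i => PySem.List.slice (PySem.List.slice l none (some (-3))) (some i) (some (i + 2))) ++
          [PySem.List.slice l (some (-3)) none])) :=
  congrArg String.mk (congrArg (sign ++ ·) (pvCore l h4))

-- ===== VERDICT (by name: the statement is the Claim_ definition above) =====
theorem string_with_commas_spec : Claim_equal_string_with_commas := by
  intro s _
  unfold Spec_string_with_commas
  simp only [string_with_commas, string_with_commas_alt, PySem.Chars.len_eq]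
  set s2 : List Char := PySem.Chars.join [] (PySem.Chars.splitOn (PySem.Chars.strip s.toList) [' ']) with hs2
  by_cases h1 : s2.any (fun c => pvInvalid.contains c) = true
  · simp only [if_pos h1]
  · simp only [if_neg h1]
    by_cases h2 : (PySem.Chars.startswith s2 ['-'] || PySem.Chars.startswith s2 ['+']) = true
    · simp only [if_pos h2]
      by_cases h4 : ((PySem.List.slice s2 (some 1) none).length : Int) < 4
      · simp only [if_pos h4]
      · simp only [if_neg h4]
        exact pvElse _ _ (by omega)
    · simp only [if_neg h2]
      by_cases h4 : ((s2.length : Int) < 4)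
      · simp only [if_pos h4]
      · simp only [if_neg h4]
        exact pvElse _ _ (by omega)
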